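-- pv_equiv track=rewrite | github.com/yongchoooon/paravoca | backend/app/agents/data_enrichment.py | _prioritize_gaps
-- ===== SOURCE A (Python) =====
-- from typing import Any
--
-- ROUTE_SIGNAL_GAP_TYPES = {
--     "missing_route_context",
--     "missing_related_places",
--     "missing_demand_signal",
--     "missing_crowding_signal",
--     "missing_regional_demand_signal",
-- }
--
-- THEME_GAP_TYPES = {
--     "missing_theme_specific_data",
--     "missing_pet_policy",
--     "missing_wellness_attributes",
--     "missing_medical_context",
--     "missing_story_asset",
--     "missing_sustainability_context",
--     "missing_multilingual_story",
-- }
--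
-- def _prioritize_gaps(gaps: list[dict[str, Any]]) -> list[dict[str, Any]]:
--     severity_rank = {"high": 0, "medium": 1, "low": 2}
--     indexed = list(enumerate(gaps))
--     indexed.sort(
--         key=lambda row: (
--             severity_rank.get(str(row[1].get("severity") or ""), 3),
--             0 if _is_request_strategy_gap(row[1]) else 1,
--             0 if row[1].get("target_item_id") or row[1].get("target_content_id") else 1,
--             row[0],
--         )
--     )
--     return [gap for _, gap in indexed]
--
-- def _is_request_strategy_gap(gap: dict[str, Any]) -> bool:
--     gap_type = str(gap.get("gap_type") or "")
--     return not (gap.get("target_item_id") or gap.get("target_content_id")) and (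
--         gap_type in THEME_GAP_TYPES or gap_type in ROUTE_SIGNAL_GAP_TYPES
--     )
-- ===== SOURCE B (Python) =====
-- ROUTE_SIGNAL_GAP_TYPES = {
--     "missing_route_context",
--     "missing_related_places",
--     "missing_demand_signal",
--     "missing_crowding_signal",
--     "missing_regional_demand_signal",
-- }
--
-- THEME_GAP_TYPES = {
--     "missing_theme_specific_data",
--     "missing_pet_policy",
--     "missing_wellness_attributes",
--     "missing_medical_context",
--     "missing_story_asset",
--     "missing_sustainability_context",
--     "missing_multilingual_story",
-- }
--
-- _SEVERITY_RANK = {"high": 0, "medium": 1, "low": 2}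
--
--
-- def _is_request_strategy_gap(gap):
--     gap_type = str(gap.get("gap_type") or "")
--     return not (gap.get("target_item_id") or gap.get("target_content_id")) and (
--         gap_type in THEME_GAP_TYPES or gap_type in ROUTE_SIGNAL_GAP_TYPES
--     )
--
--
-- def _bucket_key(gap):
--     sev = _SEVERITY_RANK.get(str(gap.get("severity") or ""), 3)
--     strat = 0 if _is_request_strategy_gap(gap) else 1
--     has_id = 0 if gap.get("target_item_id") or gap.get("target_content_id") else 1
--     return (sev, strat, has_id)
--
--
-- def _prioritize_gaps(gaps):
--     # bucket concatenation over the 16 fixed category triples; no sort,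
--     # input order inside each bucket supplies the index tie-break
--     keyed = [(_bucket_key(gap), gap) for gap in gaps]
--     out = []
--     for s in range(4):
--         for t in range(2):
--             for u in range(2):
--                 out.extend(gap for key, gap in keyed if key == (s, t, u))
--     return out
-- ===== Notes on version B (the rewrite author's own statement) =====
-- stated objective: alternative
-- what changed: Replaces the stable sort of (index, gap) pairs by a 4-tuple priority key with a single keying pass followed by bucket concatenation over the 16 fixed (severity, strategy, id-presence) categories, input order supplying the tie-break.
import Mathlib
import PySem

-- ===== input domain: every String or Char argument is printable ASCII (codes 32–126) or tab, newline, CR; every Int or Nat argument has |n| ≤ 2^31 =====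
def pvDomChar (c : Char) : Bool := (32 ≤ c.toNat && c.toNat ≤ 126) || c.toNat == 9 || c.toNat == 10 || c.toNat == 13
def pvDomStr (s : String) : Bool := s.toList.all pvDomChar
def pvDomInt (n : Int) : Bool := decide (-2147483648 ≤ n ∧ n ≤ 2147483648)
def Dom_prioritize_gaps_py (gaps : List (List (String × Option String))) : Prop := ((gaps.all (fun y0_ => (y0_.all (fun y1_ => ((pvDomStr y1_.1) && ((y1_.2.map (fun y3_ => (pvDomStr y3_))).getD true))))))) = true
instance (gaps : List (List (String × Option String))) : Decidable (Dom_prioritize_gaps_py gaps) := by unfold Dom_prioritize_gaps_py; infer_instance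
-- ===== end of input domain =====

-- B replaces the key-tuple stable sort by a single keying pass plus bucket concatenation
-- over the 16 bounded priority categories (objective: alternative).

-- ===== shared module context (both Python files carry these same helpers) =====
def pvRouteSignalGapTypes : PySem.Set String := PySem.Set.ofList
  ["missing_route_context", "missing_related_places", "missing_demand_signal",
   "missing_crowding_signal", "missing_regional_demand_signal"]

def pvThemeGapTypes : PySem.Set String := PySem.Set.ofList
  ["missing_theme_specific_data", "missing_pet_policy", "missing_wellness_attributes",
   "missing_medical_context", "missing_story_asset", "missing_sustainability_context",
   "missing_multilingual_story"]

-- str(gap.get(k) or "") for an Option String-valued dict: missing key, None and "" all give ""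
def pvGetStr (gap : List (String × Option String)) (k : String) : String :=
  match (PySem.Dict.mk gap).get? k with
  | some (some s) => s
  | _ => ""

-- truthiness of gap.get(k): present, not None and non-empty
def pvTruthy (gap : List (String × Option String)) (k : String) : Bool :=
  match (PySem.Dict.mk gap).get? k with
  | some (some s) => s ≠ ""
  | _ => false

def is_request_strategy_gap_py (gap : List (String × Option String)) : Bool :=
  let gap_type := pvGetStr gap "gap_type"
  (!(pvTruthy gap "target_item_id" || pvTruthy gap "target_content_id")) &&
    (PySem.Set.contains pvThemeGapTypes gap_type || PySem.Set.contains pvRouteSignalGapTypes gap_type)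

def pvSeverityRank : PySem.Dict String Int := PySem.Dict.mk [("high", 0), ("medium", 1), ("low", 2)]

-- ===== PORT A =====
-- the sort key lambda; a Python 4-tuple of ints is ported as List Int (lexicographic <)
def pvSortKey (row : Int × List (String × Option String)) : List Int :=
  [PySem.Dict.getD pvSeverityRank (pvGetStr row.2 "severity") 3,
   if is_request_strategy_gap_py row.2 then 0 else 1,
   if pvTruthy row.2 "target_item_id" || pvTruthy row.2 "target_content_id" then 0 else 1,
   row.1]

def prioritize_gaps_py (gaps : List (List (String × Option String))) : List (List (String × Option String)) :=
  let indexed := PySem.List.enumerate gaps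
  (PySem.List.sorted indexed pvSortKey).map (·.2)

-- ===== PORT B =====
def bucket_key_py (gap : List (String × Option String)) : Int × Int × Int :=
  (PySem.Dict.getD pvSeverityRank (pvGetStr gap "severity") 3,
   if is_request_strategy_gap_py gap then 0 else 1,
   if pvTruthy gap "target_item_id" || pvTruthy gap "target_content_id" then 0 else 1)

def prioritize_gaps_py_alt (gaps : List (List (String × Option String))) : List (List (String × Option String)) :=
  let keyed := gaps.map (fun g => (bucket_key_py g, g))
  (PySem.List.pyRange 0 4 1).foldl (fun out s =>
    (PySem.List.pyRange 0 2 1).foldl (fun out t =>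
      (PySem.List.pyRange 0 2 1).foldl (fun out u =>
        out ++ (keyed.filter (fun kg => kg.1 == (s, t, u))).map (·.2)) out) out) []

-- ===== PRECONDITION & SPEC =====
def Spec_prioritize_gaps_py (gaps : List (List (String × Option String))) (out : List (List (String × Option String))) : Prop := out = prioritize_gaps_py_alt gaps
instance (gaps : List (List (String × Option String))) (out : List (List (String × Option String))) : Decidable (Spec_prioritize_gaps_py gaps out) := by unfold Spec_prioritize_gaps_py; infer_instance

-- ===== CLAIM (what is proved, stated in full; the proofs are below) =====
def Claim_equal_prioritize_gaps_py : Prop := ∀ (gaps : List (List (String × Option String))), Dom_prioritize_gaps_py gaps → Spec_prioritize_gaps_py gaps (prioritize_gaps_py gaps)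

-- ===== LEMMAS AND PROOFS =====

-- the 16 bucket keys in the order B emits them
def pvKS : List (Int × Int × Int) :=
  [(0,0,0),(0,0,1),(0,1,0),(0,1,1),(1,0,0),(1,0,1),(1,1,0),(1,1,1),
   (2,0,0),(2,0,1),(2,1,0),(2,1,1),(3,0,0),(3,0,1),(3,1,0),(3,1,1)]

theorem pvAlt_eq_flatMap (gaps : List (List (String × Option String))) :
    prioritize_gaps_py_alt gaps =
      pvKS.flatMap (fun k => gaps.filter (fun g => bucket_key_py g == k)) := by
  have h4 : PySem.List.pyRange 0 4 1 = [0, 1, 2, 3] := by decide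
  have h2 : PySem.List.pyRange 0 2 1 = [0, 1] := by decide
  simp only [prioritize_gaps_py_alt, pvKS, h4, h2, List.foldl, List.flatMap_cons, List.flatMap_nil,
    List.filter_map]
  simp [Function.comp_def, List.append_assoc]

theorem pvSortKey_eq (row : Int × List (String × Option String)) :
    pvSortKey row = [(bucket_key_py row.2).1, (bucket_key_py row.2).2.1, (bucket_key_py row.2).2.2, row.1] := rfl

-- buckets cover every gap
theorem pvKey_mem_KS (g : List (String × Option String)) : bucket_key_py g ∈ pvKS := by
  have h1 : PySem.Dict.getD pvSeverityRank (pvGetStr g "severity") 3 = 0 ∨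
      PySem.Dict.getD pvSeverityRank (pvGetStr g "severity") 3 = 1 ∨
      PySem.Dict.getD pvSeverityRank (pvGetStr g "severity") 3 = 2 ∨
      PySem.Dict.getD pvSeverityRank (pvGetStr g "severity") 3 = 3 := by
    simp only [pvSeverityRank, PySem.Dict.getD, PySem.Dict.get?_mk_cons]
    split_ifs <;> simp [PySem.Dict.get?]
  unfold bucket_key_py pvKS
  rcases h1 with h|h|h|h <;> rw [h] <;> split_ifs <;> simp

-- generic: concatenating the filters over a duplicate-free covering key list is a permutation
theorem pvFlatMap_filter_perm {α κ : Type} [BEq κ] [LawfulBEq κ] (ks : List κ) (f : α → κ)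
    (hnd : ks.Nodup) : ∀ (l : List α), (∀ x ∈ l, f x ∈ ks) →
    (ks.flatMap (fun k => l.filter (fun x => f x == k))).Perm l := by
  induction ks with
  | nil =>
    intro l hcov
    have hl : l = [] := List.eq_nil_iff_forall_not_mem.mpr (fun x hx => by simpa using hcov x hx)
    simp [hl]
  | cons k ks ih =>
    intro l hcov
    rw [List.flatMap_cons]
    have hrest : ∀ k' ∈ ks, l.filter (fun x => f x == k') =
        (l.filter (fun x => !(f x == k))).filter (fun x => f x == k') := by
      intro k' hk'
      rw [List.filter_filter]
      apply List.filter_congr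
      intro x _
      have hne : k' ≠ k := fun h => (List.nodup_cons.mp hnd).1 (h ▸ hk')
      by_cases h : f x = k'
      · simp [h, hne]
      · simp [h]
    have hfm : ks.flatMap (fun k' => l.filter (fun x => f x == k')) =
        ks.flatMap (fun k' => (l.filter (fun x => !(f x == k))).filter (fun x => f x == k')) := by
      rw [List.flatMap_def, List.flatMap_def, List.map_congr_left hrest]
    rw [hfm]
    have hih := ih (List.nodup_cons.mp hnd).2 (l.filter (fun x => !(f x == k)))
      (by
        intro x hx
        rcases List.mem_filter.mp hx with ⟨hxl, hxk⟩
        have := hcov x hxl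
        simp only [List.mem_cons] at this
        rcases this with h | h
        · simp [h] at hxk
        · exact h)
    exact ((hih.append_left _).trans (List.filter_append_perm _ l))

-- lex order on the 4-element keys: equal bucket triple, smaller index
theorem pvKeyLt_of_eq (a b : Int × List (String × Option String))
    (h : bucket_key_py a.2 = bucket_key_py b.2) (hi : a.1 < b.1) :
    pvSortKey a < pvSortKey b := by
  rw [pvSortKey_eq, pvSortKey_eq, h]
  simp [List.cons_lt_cons_iff, hi]

-- lex order on the 4-element keys: strictly smaller bucket triple, any indices
theorem pvKeyLt_of_lt (a b : Int × List (String × Option String))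
    (h : ([(bucket_key_py a.2).1, (bucket_key_py a.2).2.1, (bucket_key_py a.2).2.2] : List Int) <
         [(bucket_key_py b.2).1, (bucket_key_py b.2).2.1, (bucket_key_py b.2).2.2]) :
    pvSortKey a < pvSortKey b := by
  rw [pvSortKey_eq, pvSortKey_eq]
  simp only [List.cons_lt_cons_iff] at h ⊢
  tauto

-- ===== VERDICT (by name: the statement is the Claim_ definition above) =====
theorem prioritize_gaps_py_spec : Claim_equal_prioritize_gaps_py := by
  intro gaps _
  show prioritize_gaps_py gaps = prioritize_gaps_py_alt gaps
  rw [pvAlt_eq_flatMap]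
  unfold prioritize_gaps_py
  have hnd : pvKS.Nodup := by decide
  have hperm := pvFlatMap_filter_perm pvKS
      (fun row : Int × List (String × Option String) => bucket_key_py row.2) hnd
      (PySem.List.enumerate gaps) (fun x _ => pvKey_mem_KS x.2)
  have hin : ∀ k ∈ pvKS, ((PySem.List.enumerate gaps).filter
      (fun row => bucket_key_py row.2 == k)).Pairwise
      (fun a b => pvSortKey a < pvSortKey b) := by
    intro k _
    have hidx := (PySem.List.pairwise_lt_enumerate gaps 0).filter
      (fun row => bucket_key_py row.2 == k)
    refine hidx.imp_of_mem ?_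
    intro a b ha hb hi
    have h1 := beq_iff_eq.mp (List.mem_filter.mp ha).2
    have h2 := beq_iff_eq.mp (List.mem_filter.mp hb).2
    exact pvKeyLt_of_eq a b (by rw [h1, h2]) hi
  have hKS : pvKS.Pairwise (fun k l => ([k.1, k.2.1, k.2.2] : List Int) < [l.1, l.2.1, l.2.2]) := by
    decide
  have hacross : pvKS.Pairwise (fun k1 k2 =>
      ∀ x ∈ (PySem.List.enumerate gaps).filter (fun row => bucket_key_py row.2 == k1),
      ∀ y ∈ (PySem.List.enumerate gaps).filter (fun row => bucket_key_py row.2 == k2),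
      pvSortKey x < pvSortKey y) := by
    refine hKS.imp ?_
    intro k1 k2 h3 x hx y hy
    have hxk := beq_iff_eq.mp (List.mem_filter.mp hx).2
    have hyk := beq_iff_eq.mp (List.mem_filter.mp hy).2
    apply pvKeyLt_of_lt
    rw [hxk, hyk]
    exact h3
  have hpw := List.pairwise_flatMap.mpr (And.intro hin hacross)
  beta_reduce at hperm
  show (PySem.List.sorted (PySem.List.enumerate gaps) pvSortKey).map (fun x => x.2) =
    List.flatMap (fun k => List.filter (fun g => bucket_key_py g == k) gaps) pvKS
  have key : PySem.List.sorted (PySem.List.enumerate gaps) pvSortKey =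
      pvKS.flatMap (fun k => List.filter (fun x => bucket_key_py x.2 == k)
        (PySem.List.enumerate gaps)) :=
    by have h := PySem.List.sorted_eq_of_perm_of_pairwise_lt _ _ _ hperm hpw
       convert h using 2
  rw [key]
  rw [List.map_flatMap]
  have hmap : ∀ k' ∈ pvKS, ((PySem.List.enumerate gaps).filter
      (fun row => bucket_key_py row.2 == k')).map (fun x => x.2) =
      gaps.filter (fun g => bucket_key_py g == k') := by
    intro k' _
    conv_rhs => rw [← PySem.List.map_snd_enumerate gaps 0]
    rw [List.filter_map]
    simp [Function.comp_def]
  rw [List.flatMap_def, List.flatMap_def, List.map_congr_left hmap]
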